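-- pv_equiv track=rewrite | github.com/muhdshahan/Daily-DSA | 3856-trim-trailing-vowels/3856-trim-trailing-vowels.py | trimTrailingVowels
-- ===== SOURCE A (Python) =====
-- def trimTrailingVowels(s: str) -> str:
--     vowels = 'aeiou'
--     tr_len = 0
--     for letter in s[::-1]:
--         if letter in vowels:
--             tr_len+=1
--         else:
--             return s[:len(s)-tr_len]
--     return s[:len(s)-tr_len]
-- ===== SOURCE B (Python) =====
-- def trimTrailingVowels(s: str) -> str:
--     # Forward single pass: remember the position just past the last non-vowel seen;
--     # everything after that position is a trailing run of vowels.
--     keep = 0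
--     for i, ch in enumerate(s):
--         if ch not in 'aeiou':
--             keep = i + 1
--     return s[:keep]
-- ===== Notes on version B (the rewrite author's own statement) =====
-- stated objective: alternative
-- what changed: Instead of scanning the reversed string and counting trailing vowels to slice off, B scans forward once, tracking the index just past the last non-vowel character, and takes that prefix.
import Mathlib
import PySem

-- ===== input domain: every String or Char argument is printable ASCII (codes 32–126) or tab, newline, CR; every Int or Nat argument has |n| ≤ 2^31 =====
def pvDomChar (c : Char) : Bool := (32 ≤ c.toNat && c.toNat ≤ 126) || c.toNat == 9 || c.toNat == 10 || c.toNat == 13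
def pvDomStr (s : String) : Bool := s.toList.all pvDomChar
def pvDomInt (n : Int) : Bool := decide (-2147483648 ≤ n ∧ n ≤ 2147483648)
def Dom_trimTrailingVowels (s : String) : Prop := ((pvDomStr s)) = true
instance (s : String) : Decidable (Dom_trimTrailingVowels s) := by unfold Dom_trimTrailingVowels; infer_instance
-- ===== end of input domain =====

-- B replaces A's reverse scan (count trailing vowels, then slice them off) by a single forward
-- pass that tracks the index just past the last non-vowel and keeps that prefix (alternative).

-- ===== PORT A =====
-- 'letter in vowels' for a single character is membership of that character in 'aeiou'
def pvVowelsA : List Char := "aeiou".toList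

-- the loop of A: walks the reversed character list, counting trailing vowels in tr_len;
-- on the first non-vowel (or at the end) returns s[:len(s)-tr_len]
def trimAuxA (s : String) (rev : List Char) (tr_len : Int) : String :=
  match rev with
  | [] => PySem.Str.slice s none (some (PySem.Str.len s - tr_len))
  | letter :: rest =>
    if pvVowelsA.contains letter then
      trimAuxA s rest (tr_len + 1)
    else
      PySem.Str.slice s none (some (PySem.Str.len s - tr_len))

def trimTrailingVowels (s : String) : String :=
  -- s[::-1] is the reverse of the character list
  trimAuxA s s.toList.reverse 0

-- ===== PORT B =====
-- forward pass over enumerate(s): keep := i+1 at every non-vowel; return s[:keep]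
def trimTrailingVowels_alt (s : String) : String :=
  let keep : Int :=
    (PySem.List.enumerate s.toList).foldl
      (fun keep p => if "aeiou".toList.contains p.2 then keep else p.1 + 1) 0
  PySem.Str.slice s none (some keep)

-- ===== PRECONDITION & SPEC =====
def Spec_trimTrailingVowels (s : String) (out : String) : Prop := out = trimTrailingVowels_alt s
instance (s : String) (out : String) : Decidable (Spec_trimTrailingVowels s out) := by unfold Spec_trimTrailingVowels; infer_instance

-- ===== CLAIM (what is proved, stated in full; the proofs are below) =====
def Claim_equal_trimTrailingVowels : Prop := ∀ (s : String), Dom_trimTrailingVowels s → Spec_trimTrailingVowels s (trimTrailingVowels s)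

-- ===== LEMMAS AND PROOFS =====

-- proof-side canonical form: the string with its trailing vowel run removed
def rstripForm (s : String) : String :=
  String.ofList ((s.toList.reverse.dropWhile (fun c => "aeiou".toList.contains c)).reverse)

-- A's loop invariant: if s.toList.reverse = pre ++ rev with every char of pre a vowel and
-- tr_len = pre.length, then the loop returns the canonical form
lemma trimAuxA_invariant (s : String) (rev pre : List Char)
    (hsplit : s.toList.reverse = pre ++ rev)
    (hpre : ∀ c ∈ pre, pvVowelsA.contains c = true) :
    trimAuxA s rev (pre.length : Int) = rstripForm s := by
  induction rev generalizing pre with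
  | nil =>
    have hdrop : s.toList.reverse.dropWhile (fun c => "aeiou".toList.contains c) = [] := by
      rw [hsplit, List.append_nil, List.dropWhile_eq_nil_iff]
      intro c hc; exact hpre c hc
    simp only [trimAuxA, rstripForm, hdrop, List.reverse_nil]
    have hlen : s.toList.length = pre.length := by
      have := congrArg List.length hsplit; simpa using this
    apply String.ext
    simp only [PySem.Str.toList_slice, PySem.Chars.slice_eq_listSlice, PySem.Str.len_eq]
    rw [show ((s.toList.length : Int) - (pre.length : Int)) = 0 from by omega]
    rw [PySem.List.slice_to _ le_rfl]
    simp
  | cons c rest ih =>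
    by_cases hv : pvVowelsA.contains c = true
    · have hstep : trimAuxA s (c :: rest) (pre.length : Int) =
          trimAuxA s rest ((pre.length : Int) + 1) := by
        conv_lhs => rw [trimAuxA]
        rw [if_pos hv]
      rw [hstep]
      have hcast : ((pre.length : Int) + 1) = ((pre ++ [c]).length : Int) := by
        simp
      rw [hcast]
      exact ih (pre ++ [c]) (by simpa using hsplit)
        (by intro x hx
            rcases List.mem_append.mp hx with h | h
            · exact hpre x h
            · simp at h; subst h; exact hv)
    · have hvf : pvVowelsA.contains c = false := by
        cases h : pvVowelsA.contains c with
        | true => exact absurd h hv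
        | false => rfl
      have hdrop : s.toList.reverse.dropWhile (fun c => "aeiou".toList.contains c)
          = c :: rest := by
        rw [hsplit, List.dropWhile_append]
        have h1 : pre.dropWhile (fun c => "aeiou".toList.contains c) = [] :=
          List.dropWhile_eq_nil_iff.mpr (fun x hx => by simpa [pvVowelsA] using hpre x hx)
        rw [h1]
        simp only [List.isEmpty_nil, if_true]
        rw [List.dropWhile_cons_of_neg (by simpa [pvVowelsA] using hv)]
      have hA : trimAuxA s (c :: rest) (pre.length : Int) =
          PySem.Str.slice s none (some (PySem.Str.len s - (pre.length : Int))) := by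
        conv_lhs => rw [trimAuxA]
        rw [if_neg hv]
      have hs' : s.toList = (c :: rest).reverse ++ pre.reverse := by
        have := congrArg List.reverse hsplit; simpa using this
      rw [hA]
      simp only [rstripForm, hdrop]
      have hlen : s.toList.length = pre.length + (rest.length + 1) := by
        have := congrArg List.length hsplit; simpa using this
      apply String.ext
      simp only [PySem.Str.toList_slice, PySem.Chars.slice_eq_listSlice, PySem.Str.len_eq]
      rw [PySem.List.slice_to _ (by omega)]
      have htn : ((s.toList.length : Int) - (pre.length : Int)).toNat = (c :: rest).reverse.length := by
        simp only [List.length_reverse, List.length_cons]; omega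
      rw [htn, hs', List.take_left]
      simp

-- B's fold computes length minus the length of the trailing vowel run
lemma foldB_eq (l : List Char) :
    (PySem.List.enumerate l).foldl
      (fun keep p => if "aeiou".toList.contains p.2 then keep else p.1 + 1) 0
    = (l.length : Int) - ((l.reverse.takeWhile (fun c => "aeiou".toList.contains c)).length : Int) := by
  induction l using List.reverseRecOn with
  | nil => simp [PySem.List.enumerate]
  | append_singleton l' c ih =>
    rw [show PySem.List.enumerate (l' ++ [c]) = PySem.List.enumerate l' ++ [((l'.length : Int), c)] from by
      simp [PySem.List.enumerate_append, PySem.List.enumerate_cons, PySem.List.enumerate_nil]]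
    rw [List.foldl_append, ih]
    by_cases hv : "aeiou".toList.contains c = true
    · have hrun : (l' ++ [c]).reverse.takeWhile (fun c => "aeiou".toList.contains c)
          = c :: l'.reverse.takeWhile (fun c => "aeiou".toList.contains c) := by
        rw [List.reverse_append, List.reverse_singleton, List.singleton_append,
          List.takeWhile_cons, if_pos hv]
      simp only [List.foldl_cons, List.foldl_nil, if_pos hv, hrun]
      simp
    · have hvf : "aeiou".toList.contains c = false := by
        cases h : "aeiou".toList.contains c with
        | true => exact absurd h hv
        | false => rfl
      have hrun : (l' ++ [c]).reverse.takeWhile (fun c => "aeiou".toList.contains c) = [] := by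
        rw [List.reverse_append, List.reverse_singleton, List.singleton_append,
          List.takeWhile_cons, if_neg hv]
      simp only [List.foldl_cons, List.foldl_nil, if_neg hv, hrun]
      simp
    
-- B equals the canonical form
lemma altB_eq_rstripForm (s : String) : trimTrailingVowels_alt s = rstripForm s := by
  unfold trimTrailingVowels_alt rstripForm
  rw [foldB_eq]
  obtain ⟨r, hr⟩ : ∃ r, r = s.toList.reverse.takeWhile (fun c => "aeiou".toList.contains c) :=
    ⟨_, rfl⟩
  obtain ⟨d, hd⟩ : ∃ d, d = s.toList.reverse.dropWhile (fun c => "aeiou".toList.contains c) :=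
    ⟨_, rfl⟩
  have hrun_le : r.length ≤ s.toList.length := by
    rw [hr]
    calc (s.toList.reverse.takeWhile (fun c => "aeiou".toList.contains c)).length
        ≤ s.toList.reverse.length := (List.takeWhile_prefix _).length_le
      _ = s.toList.length := List.length_reverse
  have hsplit : s.toList = d.reverse ++ r.reverse := by
    rw [hr, hd]
    conv_lhs => rw [← List.reverse_reverse s.toList,
      ← List.takeWhile_append_dropWhile (p := fun c => "aeiou".toList.contains c)
        (l := s.toList.reverse)]
    rw [List.reverse_append]
  apply String.ext
  simp only [PySem.Str.toList_slice, PySem.Chars.slice_eq_listSlice]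
  rw [← hr, ← hd]
  rw [PySem.List.slice_to _ (by omega)]
  have hlenlen : s.toList.length = d.length + r.length := by
    have := congrArg List.length hsplit
    simp only [List.length_append, List.length_reverse] at this
    omega
  have htn : (((s.toList.length : Int)) - ((r.length : Int))).toNat = d.reverse.length := by
    simp only [List.length_reverse]; omega
  rw [htn]
  conv_lhs => rw [hsplit]
  rw [List.take_left]
  simp

-- ===== VERDICT (by name: the statement is the Claim_ definition above) =====
theorem trimTrailingVowels_spec : Claim_equal_trimTrailingVowels := by
  intro s _
  unfold Spec_trimTrailingVowels trimTrailingVowels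
  rw [altB_eq_rstripForm]
  have := trimAuxA_invariant s s.toList.reverse [] (by simp) (by simp)
  simpa using this
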